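-- pv_equiv track=rewrite | github.com/vaezim/Advent-of-Code | 2023/day12/utils.py | _IsCorrectArrangement
-- ===== SOURCE A (Python) =====
-- def _IsCorrectArrangement(spring, arr):
--     curr = 0
--     spring_arr = []
--     for n in spring:
--         if n == ".":
--             if curr > 0:
--                 spring_arr.append(curr)
--             curr = 0
--             continue
--         if n == "#":
--             curr += 1
--     if curr > 0:
--         spring_arr.append(curr)
--     return spring_arr == arr
-- ===== SOURCE B (Python) =====
-- def _IsCorrectArrangement(spring, arr):
--     clean = "".join(c for c in spring if c in "#.")
--     groups = [len(run) for run in clean.split(".") if run]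
--     return groups == arr
-- ===== Notes on version B (the rewrite author's own statement) =====
-- stated objective: simpler
-- what changed: Replaces A's manual counter/accumulator loop with a split-then-measure decomposition: filter to the relevant characters, split on '.', and compare run lengths.
import Mathlib
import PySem

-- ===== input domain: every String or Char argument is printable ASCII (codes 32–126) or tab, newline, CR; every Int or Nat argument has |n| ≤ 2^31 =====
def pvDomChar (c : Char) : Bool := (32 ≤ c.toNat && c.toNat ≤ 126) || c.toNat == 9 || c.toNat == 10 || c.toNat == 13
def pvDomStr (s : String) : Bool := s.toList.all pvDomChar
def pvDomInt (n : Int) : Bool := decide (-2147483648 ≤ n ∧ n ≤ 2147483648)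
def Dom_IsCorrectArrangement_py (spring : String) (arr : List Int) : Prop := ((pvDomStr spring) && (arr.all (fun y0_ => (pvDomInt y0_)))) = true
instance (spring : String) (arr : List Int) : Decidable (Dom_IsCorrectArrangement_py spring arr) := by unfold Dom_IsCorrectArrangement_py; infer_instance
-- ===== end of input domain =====

-- ===== PORT A =====
-- A's loop body: a running '#' counter flushed into the accumulator on each '.', other chars ignored.
def pvStepA (s : Int × List Int) (n : Char) : Int × List Int :=
  if n == '.' then (0, if s.1 > 0 then s.2 ++ [s.1] else s.2)
  else if n == '#' then (s.1 + 1, s.2)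
  else s

def IsCorrectArrangement_py (spring : String) (arr : List Int) : Bool :=
  let st := spring.toList.foldl pvStepA (0, [])
  let spring_arr := if st.1 > 0 then st.2 ++ [st.1] else st.2
  spring_arr == arr

-- ===== PORT B =====
-- B: keep only '#'/'.', split on '.', compare the lengths of the nonempty runs.
def IsCorrectArrangement_py_alt (spring : String) (arr : List Int) : Bool :=
  let clean := spring.toList.filter (fun c => c == '#' || c == '.')
  let groups := ((PySem.Chars.splitOn clean ['.']).filter (fun run => !run.isEmpty)).map
      (fun run => (run.length : Int))
  groups == arr

-- ===== PRECONDITION & SPEC =====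
def Spec_IsCorrectArrangement_py (spring : String) (arr : List Int) (out : Bool) : Prop := out = IsCorrectArrangement_py_alt spring arr
instance (spring : String) (arr : List Int) (out : Bool) : Decidable (Spec_IsCorrectArrangement_py spring arr out) := by unfold Spec_IsCorrectArrangement_py; infer_instance

-- ===== CLAIM (what is proved, stated in full; the proofs are below) =====
def Claim_equal_IsCorrectArrangement_py : Prop := ∀ (spring : String) (arr : List Int), Dom_IsCorrectArrangement_py spring arr → Spec_IsCorrectArrangement_py spring arr (IsCorrectArrangement_py spring arr)

-- ===== LEMMAS AND PROOFS =====

-- the run lengths A's loop produces, as a clean recursion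
def pvRuns (curr : Int) : List Char → List Int
  | [] => if curr > 0 then [curr] else []
  | c :: cs =>
    if c = '.' then (if curr > 0 then [curr] else []) ++ pvRuns 0 cs
    else if c = '#' then pvRuns (curr + 1) cs
    else pvRuns curr cs

-- fuel-free reading of PySem.Chars.splitOn on a single-char separator
def pvSplit (sep : Char) : List Char → List Char → List (List Char)
  | [], cur => [cur.reverse]
  | c :: rest, cur =>
    if c = sep then cur.reverse :: pvSplit sep rest []
    else pvSplit sep rest (c :: cur)

theorem pvSplit_go (sep : Char) (l : List Char) : ∀ (fuel : Nat) (cur : List Char)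
    (acc : List (List Char)), l.length ≤ fuel →
    PySem.Chars.splitOn.go [sep] fuel l cur acc = acc.reverse ++ pvSplit sep l cur := by
  induction l with
  | nil =>
    intro fuel cur acc _
    cases fuel <;> simp [PySem.Chars.splitOn.go, pvSplit]
  | cons c rest ih =>
    intro fuel cur acc h
    cases fuel with
    | zero => simp at h
    | succ f =>
      by_cases hc : c = sep
      · subst hc
        rw [show PySem.Chars.splitOn.go [c] (f + 1) (c :: rest) cur acc
              = PySem.Chars.splitOn.go [c] f rest [] (cur.reverse :: acc) from by
            simp [PySem.Chars.splitOn.go, List.isPrefixOf]]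
        rw [ih f [] (cur.reverse :: acc) (by simpa using Nat.le_of_succ_le_succ h)]
        simp [pvSplit]
      · rw [show PySem.Chars.splitOn.go [sep] (f + 1) (c :: rest) cur acc
              = PySem.Chars.splitOn.go [sep] f rest (c :: cur) acc from by
            simp [PySem.Chars.splitOn.go, List.isPrefixOf,
              show (sep == c) = false from beq_eq_false_iff_ne.mpr (fun h' => hc h'.symm)]]
        rw [ih f (c :: cur) acc (by simpa using Nat.le_of_succ_le_succ h)]
        simp [pvSplit, hc]

theorem pvSplitOn_eq (sep : Char) (l : List Char) :
    PySem.Chars.splitOn l [sep] = pvSplit sep l [] := by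
  unfold PySem.Chars.splitOn
  simpa using pvSplit_go sep l (l.length + 1) [] [] (Nat.le_succ _)

-- B's groups of the cleaned list are A's runs
theorem pvSplit_runs (l : List Char) (h : ∀ c ∈ l, c = '#' ∨ c = '.') :
    ∀ cur : List Char,
    ((pvSplit '.' l cur).filter (fun run => !run.isEmpty)).map (fun run => (run.length : Int))
      = pvRuns (cur.length : Int) l := by
  induction l with
  | nil =>
    intro cur
    cases cur <;> simp [pvSplit, pvRuns]
  | cons c rest ih =>
    intro cur
    have hrest : ∀ x ∈ rest, x = '#' ∨ x = '.' := fun x hx => h x (List.mem_cons_of_mem _ hx)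
    rcases h c List.mem_cons_self with hc | hc <;> subst hc
    · have := ih hrest ('#' :: cur)
      simp only [pvSplit, pvRuns, if_neg (by decide : ¬ ('#' : Char) = '.')]
      simpa [Int.add_comm] using this
    · have hnext := ih hrest []
      by_cases hcur : cur = []
      · subst hcur; simp [pvSplit, pvRuns, hnext]
      · simp [pvSplit, pvRuns, hcur, hnext, List.length_pos_iff]

-- characters other than '#' and '.' do not affect the runs
theorem pvRuns_filter (l : List Char) : ∀ curr : Int,
    pvRuns curr (l.filter (fun c => c == '#' || c == '.')) = pvRuns curr l := by
  induction l with
  | nil => intro curr; rfl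
  | cons c rest ih =>
    intro curr
    by_cases h1 : c = '.'
    · subst h1; simp [pvRuns, ih]
    · by_cases h2 : c = '#'
      · subst h2; simp [pvRuns, ih]
      · simp [pvRuns, h1, h2, ih]

-- A's foldl produces acc ++ runs
theorem pvFoldA (l : List Char) : ∀ (curr : Int) (acc : List Int),
    (if (l.foldl pvStepA (curr, acc)).1 > 0
      then (l.foldl pvStepA (curr, acc)).2 ++ [(l.foldl pvStepA (curr, acc)).1]
      else (l.foldl pvStepA (curr, acc)).2) = acc ++ pvRuns curr l := by
  induction l with
  | nil =>
    intro curr acc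
    by_cases h : curr > 0 <;> simp [pvRuns, h]
  | cons c rest ih =>
    intro curr acc
    rw [List.foldl_cons]
    by_cases h1 : c = '.'
    · subst h1
      rw [show pvStepA (curr, acc) '.' = (0, if curr > 0 then acc ++ [curr] else acc) from by
        simp [pvStepA]]
      rw [ih]
      by_cases h : curr > 0 <;> simp [pvRuns, h]
    · by_cases h2 : c = '#'
      · subst h2
        rw [show pvStepA (curr, acc) '#' = (curr + 1, acc) from by simp [pvStepA]]
        rw [ih]
        simp [pvRuns]
      · rw [show pvStepA (curr, acc) c = (curr, acc) from by simp [pvStepA, h1, h2]]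
        rw [ih]
        simp [pvRuns, h1, h2]

-- ===== VERDICT (by name: the statement is the Claim_ definition above) =====
theorem IsCorrectArrangement_py_spec : Claim_equal_IsCorrectArrangement_py := by
  intro spring arr _
  unfold Spec_IsCorrectArrangement_py
  simp only [IsCorrectArrangement_py, IsCorrectArrangement_py_alt]
  rw [pvFoldA, pvSplitOn_eq,
    pvSplit_runs _ (by intro c hc; simpa using (List.mem_filter.mp hc).2) []]
  rw [show ((([] : List Char)).length : Int) = 0 from rfl, pvRuns_filter]
  simp
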